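-- pv_equiv track=rewrite | github.com/Nikoletos-K/WinnER | src/hash/wta.py | wta_similarity
-- ===== SOURCE A (Python) =====
-- def wta_similarity(vector1, vector2):
--
--     PO=0
--     for i in range(0,len(vector1),1):
--         for j in range(0,i,1):
--             ij_1 = vector1[i] - vector1[j]
--             ij_2 = vector2[i] - vector2[j]
--             PO += wta_threshold(ij_1*ij_2)
--
--     return PO
--
-- def wta_threshold(x):
--
--     if x>0:
--         return 1
--     else:
--         return 0
-- ===== SOURCE B (Python) =====
-- def wta_similarity(vector1, vector2):
--     # Pair up the two coordinates per index, sort by the first coordinate; a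
--     # pair of elements is concordant exactly when an earlier sorted element is
--     # strictly below a later one in BOTH coordinates, so one ordered scan with
--     # two strict comparisons replaces A's sign-of-product test on index pairs.
--     pairs = sorted(((vector1[i], vector2[i]) for i in range(len(vector1))),
--                    key=lambda p: p[0])
--     total = 0
--     seen = []
--     for a, b in pairs:
--         for x, y in seen:
--             if x < a and y < b:
--                 total += 1
--         seen.append((a, b))
--     return total
-- ===== Notes on version B (the rewrite author's own statement) =====
-- stated objective: alternative
-- what changed: B pairs the coordinates per index, sorts the pairs by the first coordinate once and counts, for each element, the earlier sorted elements strictly smaller in both coordinates, replacing A's index-based sign-of-product test over all index pairs.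
-- outside the precondition, e.g. on wta_similarity([5], []): A returns 0, B raises IndexError
import Mathlib
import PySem

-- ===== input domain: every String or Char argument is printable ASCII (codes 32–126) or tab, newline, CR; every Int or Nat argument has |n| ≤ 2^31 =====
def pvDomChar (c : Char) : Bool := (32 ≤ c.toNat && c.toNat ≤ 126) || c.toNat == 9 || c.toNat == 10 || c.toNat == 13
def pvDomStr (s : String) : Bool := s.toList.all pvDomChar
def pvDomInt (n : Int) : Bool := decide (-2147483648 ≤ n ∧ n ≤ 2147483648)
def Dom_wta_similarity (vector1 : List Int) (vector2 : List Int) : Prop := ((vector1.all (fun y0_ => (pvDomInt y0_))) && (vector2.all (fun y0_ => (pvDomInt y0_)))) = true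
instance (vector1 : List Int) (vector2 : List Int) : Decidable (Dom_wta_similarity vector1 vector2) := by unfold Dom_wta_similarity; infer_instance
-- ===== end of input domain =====

-- B pairs the coordinates per index, sorts the pairs by the first coordinate and
-- counts, per element, the earlier sorted elements strictly below it in both
-- coordinates (alternative algorithm, same result; no argument is mutated).

-- ===== PORT A =====
def wta_threshold (x : Int) : Int := if x > 0 then 1 else 0

def wta_similarity (vector1 : List Int) (vector2 : List Int) : Int :=
  (PySem.List.pyRange 0 (vector1.length : Int) 1).foldl (fun PO i =>
    (PySem.List.pyRange 0 i 1).foldl (fun PO j =>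
      let ij_1 := PySem.List.pyGetD vector1 i 0 - PySem.List.pyGetD vector1 j 0
      let ij_2 := PySem.List.pyGetD vector2 i 0 - PySem.List.pyGetD vector2 j 0
      PO + wta_threshold (ij_1 * ij_2)) PO) 0

-- ===== PORT B =====
def wta_similarity_alt (vector1 : List Int) (vector2 : List Int) : Int :=
  let pairs := PySem.List.sorted
    ((PySem.List.pyRange 0 (vector1.length : Int) 1).map
      (fun i => (PySem.List.pyGetD vector1 i 0, PySem.List.pyGetD vector2 i 0)))
    (fun p => p.1) false
  let fin := pairs.foldl (fun (st : Int × List (Int × Int)) p =>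
      let total := st.2.foldl (fun t q => if q.1 < p.1 && q.2 < p.2 then t + 1 else t) st.1
      (total, st.2 ++ [p])) (0, [])
  fin.1

-- ===== PRECONDITION & SPEC =====
-- Pre_ excludes the inputs with vector2 shorter than vector1: A raises IndexError
-- there whenever vector1 has at least two elements, and B's per-index pairing
-- raises IndexError there already for a single element (see claim.json "cites").
def Pre_wta_similarity (vector1 : List Int) (vector2 : List Int) : Prop :=
  vector1.length ≤ vector2.length
instance (vector1 : List Int) (vector2 : List Int) : Decidable (Pre_wta_similarity vector1 vector2) := by unfold Pre_wta_similarity; infer_instance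
def pvWitness_wta_similarity : List Int × List Int := ([1, 2, 3], [3, 1, 2])

def Spec_wta_similarity (vector1 : List Int) (vector2 : List Int) (out : Int) : Prop := out = wta_similarity_alt vector1 vector2
instance (vector1 : List Int) (vector2 : List Int) (out : Int) : Decidable (Spec_wta_similarity vector1 vector2 out) := by unfold Spec_wta_similarity; infer_instance

-- ===== CLAIM (what is proved, stated in full; the proofs are below) =====
def Claim_equal_wta_similarity : Prop := ∀ (vector1 : List Int) (vector2 : List Int), Dom_wta_similarity vector1 vector2 → Pre_wta_similarity vector1 vector2 → Spec_wta_similarity vector1 vector2 (wta_similarity vector1 vector2)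

-- ===== LEMMAS AND PROOFS =====

-- the concordance predicate on a pair (earlier element, later element)
def pvP (x y : Int × Int) : Bool := decide (0 < (y.1 - x.1) * (y.2 - x.2))
-- B's strict two-coordinate comparison
def pvQ (x y : Int × Int) : Bool := x.1 < y.1 && x.2 < y.2

-- count of ordered pairs (earlier element, later element) of a list satisfying p
def pvC (p : Int × Int → Int × Int → Bool) : List (Int × Int) → Nat
  | [] => 0
  | x :: r => r.countP (fun y => p x y) + pvC p r

theorem pvP_symm (x y : Int × Int) : pvP x y = pvP y x := by
  simp only [pvP]
  have h : (y.1 - x.1) * (y.2 - x.2) = (x.1 - y.1) * (x.2 - y.2) := by ring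
  rw [h]

theorem pvC_perm (p : Int × Int → Int × Int → Bool)
    (hs : ∀ x y, p x y = p y x) {l l' : List (Int × Int)} (h : l.Perm l') :
    pvC p l = pvC p l' := by
  induction h with
  | nil => rfl
  | cons x h ih => simp [pvC, ih, h.countP_eq]
  | swap x y l =>
      simp only [pvC, List.countP_cons]
      rw [hs y x]
      split_ifs <;> omega
  | trans h1 h2 ih1 ih2 => omega

theorem pvC_congr (p q : Int × Int → Int × Int → Bool) (R : Int × Int → Int × Int → Prop)
    (hpq : ∀ x y, R x y → p x y = q x y) :
    ∀ l : List (Int × Int), l.Pairwise R → pvC p l = pvC q l := by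
  intro l hl
  induction l with
  | nil => rfl
  | cons x r ih =>
      rw [List.pairwise_cons] at hl
      simp only [pvC, ih hl.2]
      congr 1
      exact List.countP_congr (fun y hy => by rw [hpq x y (hl.1 y hy)])

-- pointwise: between elements ordered by the first coordinate, concordance is B's strict two-way comparison
theorem pvP_eq_pvQ (x y : Int × Int) (h : x.1 ≤ y.1) : pvP x y = pvQ x y := by
  simp only [pvP, pvQ]
  rcases eq_or_lt_of_le h with h1 | h1
  · have h0 : (y.1 - x.1) * (y.2 - x.2) = 0 := by rw [← h1]; ring
    simp [h0]
    omega
  · by_cases h2 : x.2 < y.2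
    · have hp : 0 < (y.1 - x.1) * (y.2 - x.2) := mul_pos (by omega) (by omega)
      simp [hp, h1, h2]
    · have hp : ¬ (0 < (y.1 - x.1) * (y.2 - x.2)) := by nlinarith
      simp [hp, h2]

-- ---- B side ----

-- the body of B's scan, with explicit state
def pvStep (st : Int × List (Int × Int)) (p : Int × Int) : Int × List (Int × Int) :=
  (st.2.foldl (fun t q => if q.1 < p.1 && q.2 < p.2 then t + 1 else t) st.1, st.2 ++ [p])

-- structural version of B's count starting from history s
def pvB : List (Int × Int) → List (Int × Int) → Nat
  | _, [] => 0
  | s, x :: r => s.countP (fun q => pvQ q x) + pvB (s ++ [x]) r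

def pvCross (s l : List (Int × Int)) : Nat :=
  (l.map (fun p => s.countP (fun q => pvQ q p))).sum

theorem pvInner_foldl (s : List (Int × Int)) (p : Int × Int) (t : Int) :
    s.foldl (fun t q => if q.1 < p.1 && q.2 < p.2 then t + 1 else t) t
      = t + (s.countP (fun q => pvQ q p) : Int) := by
  induction s generalizing t with
  | nil => simp
  | cons q s ih =>
      simp only [List.foldl_cons, List.countP_cons, ih, pvQ]
      split_ifs with hq
      · push_cast; ring
      · push_cast; ring

theorem pvFoldl_eq (l : List (Int × Int)) : ∀ (t : Int) (s : List (Int × Int)),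
    l.foldl pvStep (t, s) = (t + (pvB s l : Nat), s ++ l) := by
  induction l with
  | nil => intro t s; simp [pvB]
  | cons x r ih =>
      intro t s
      simp only [List.foldl_cons, pvStep, pvB, ih, pvInner_foldl, Prod.mk.injEq]
      refine ⟨by push_cast; ring, by simp⟩

theorem pvCross_append (s l : List (Int × Int)) (x : Int × Int) :
    pvCross (s ++ [x]) l = pvCross s l + l.countP (fun p => pvQ x p) := by
  induction l with
  | nil => simp [pvCross]
  | cons p r ih =>
      simp only [pvCross, List.map_cons, List.sum_cons, List.countP_cons,
        List.countP_append, List.countP_nil] at *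
      split_ifs <;> omega

theorem pvB_eq (l : List (Int × Int)) : ∀ s, pvB s l = pvCross s l + pvC pvQ l := by
  induction l with
  | nil => intro s; simp [pvB, pvCross, pvC]
  | cons x r ih =>
      intro s
      simp only [pvB, pvC, ih]
      rw [pvCross_append]
      simp only [pvCross, List.map_cons, List.sum_cons]
      omega

-- B's per-index pairing produces exactly zip v1 v2 when v2 is at least as long
theorem pv_pairs_eq_zip (v1 v2 : List Int) (h : v1.length ≤ v2.length) :
    (PySem.List.pyRange 0 (v1.length : Int) 1).map
      (fun i => (PySem.List.pyGetD v1 i 0, PySem.List.pyGetD v2 i 0)) = v1.zip v2 := by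
  rw [PySem.List.pyRange_zero_natCast, List.map_map]
  have hlen : (v1.zip v2).length = v1.length := by rw [List.length_zip]; omega
  apply List.ext_getElem (by simp [hlen])
  intro i h1 h2
  have hi1 : i < v1.length := by simpa using h1
  have hi2 : i < v2.length := by omega
  simp [Function.comp, PySem.List.pyGetD_natCast, List.getD_eq_getElem?_getD,
    List.getElem?_eq_getElem hi1, List.getElem?_eq_getElem hi2]

theorem alt_eq_pvC (v1 v2 : List Int) (h : v1.length ≤ v2.length) :
    wta_similarity_alt v1 v2 = (pvC pvP (v1.zip v2) : Nat) := by
  unfold wta_similarity_alt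
  dsimp only
  rw [pv_pairs_eq_zip v1 v2 h]
  have h1 : (PySem.List.sorted (v1.zip v2) (fun p => p.1) false).foldl
      (fun (st : Int × List (Int × Int)) p =>
        (st.2.foldl (fun t q => if q.1 < p.1 && q.2 < p.2 then t + 1 else t) st.1, st.2 ++ [p]))
      (0, []) = ((0 : Int) + (pvB [] (PySem.List.sorted (v1.zip v2) (fun p => p.1) false) : Nat),
        [] ++ PySem.List.sorted (v1.zip v2) (fun p => p.1) false) :=
    pvFoldl_eq _ 0 []
  rw [h1]
  simp only [zero_add, Int.natCast_inj]
  rw [pvB_eq]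
  have hc : pvCross [] (PySem.List.sorted (v1.zip v2) (fun p => p.1) false) = 0 := by
    simp [pvCross]
  rw [hc, Nat.zero_add]
  rw [← pvC_congr pvP pvQ (fun x y => x.1 ≤ y.1) (fun x y h => pvP_eq_pvQ x y h) _
    (PySem.List.sorted_pairwise (v1.zip v2) (fun p => p.1))]
  exact pvC_perm pvP pvP_symm (PySem.List.sorted_perm (v1.zip v2) (fun p => p.1) false)

-- ---- A side ----

theorem pvC_snoc (p : Int × Int → Int × Int → Bool) (l : List (Int × Int)) (x : Int × Int) :
    pvC p (l ++ [x]) = pvC p l + l.countP (fun y => p y x) := by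
  induction l with
  | nil => simp [pvC]
  | cons a r ih =>
      simp only [List.cons_append, pvC, ih, List.countP_append,
        List.countP_cons, List.countP_nil]
      split_ifs <;> omega

theorem pv_map_getD_range {α : Type} (l : List α) (d : α) :
    ∀ m, m ≤ l.length → (List.range m).map (fun j => l.getD j d) = l.take m := by
  intro m
  induction m with
  | zero => simp
  | succ m ih =>
      intro h
      have hm : m < l.length := by omega
      rw [List.range_succ, List.map_append, ih (le_of_lt hm), List.take_succ]
      simp [List.getD, List.getElem?_eq_getElem hm]

theorem a_loop (v1 v2 : List Int) (h : v1.length ≤ v2.length) :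
    ∀ m, m ≤ v1.length →
    (List.range m).foldl (fun PO i => (List.range i).foldl
        (fun PO j => PO + wta_threshold ((v1.getD i 0 - v1.getD j 0) * (v2.getD i 0 - v2.getD j 0))) PO) 0
      = ((pvC pvP ((v1.zip v2).take m)) : Nat) := by
  intro m
  induction m with
  | zero => intro _; simp [pvC]
  | succ m ih =>
      intro hm1
      have hm : m < v1.length := by omega
      have hm2 : m < v2.length := by omega
      have hlen : (v1.zip v2).length = v1.length := by
        rw [List.length_zip]; omega
      have hmz : m < (v1.zip v2).length := by omega
      rw [List.range_succ, List.foldl_append, ih (le_of_lt hm)]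
      simp only [List.foldl_cons, List.foldl_nil]
      rw [PySem.List.foldl_add]
      have hmap : (List.range m).map
          (fun j => wta_threshold ((v1.getD m 0 - v1.getD j 0) * (v2.getD m 0 - v2.getD j 0)))
          = ((v1.zip v2).take m).map (fun y => if pvP y ((v1.zip v2)[m]) then (1 : Int) else 0) := by
        rw [← pv_map_getD_range (v1.zip v2) (0, 0) m (by omega), List.map_map]
        apply List.map_congr_left
        intro j hj
        have hjm : j < m := List.mem_range.mp hj
        have hj1 : j < v1.length := by omega
        have hj2 : j < v2.length := by omega
        have hjz : j < (v1.zip v2).length := by omega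
        simp only [Function.comp, List.getD_eq_getElem _ _ hjz, List.getElem_zip,
          List.getD_eq_getElem _ _ hm, List.getD_eq_getElem _ _ hm2,
          List.getD_eq_getElem _ _ hj1, List.getD_eq_getElem _ _ hj2,
          wta_threshold, pvP]
        simp [gt_iff_lt]
      rw [hmap, PySem.List.sum_map_ite_one_zero (fun y => pvP y ((v1.zip v2)[m])) _]
      have htake : (v1.zip v2).take (m + 1) = (v1.zip v2).take m ++ [(v1.zip v2)[m]] := by
        rw [List.take_succ]
        simp [List.getElem?_eq_getElem hmz]
      rw [htake, pvC_snoc]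
      push_cast
      ring

theorem a_eq_pvC (v1 v2 : List Int) (h : v1.length ≤ v2.length) :
    wta_similarity v1 v2 = (pvC pvP (v1.zip v2) : Nat) := by
  unfold wta_similarity
  simp only [PySem.List.pyRange_zero_natCast, List.foldl_map, PySem.List.pyGetD_natCast]
  have := a_loop v1 v2 h v1.length le_rfl
  rw [List.take_of_length_le (by rw [List.length_zip]; omega)] at this
  exact this

-- ===== VERDICT (by name: the statement is the Claim_ definition above) =====
theorem wta_similarity_spec : Claim_equal_wta_similarity := by
  intro v1 v2 _ hpre
  unfold Spec_wta_similarity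
  rw [alt_eq_pvC v1 v2 hpre]
  exact a_eq_pvC v1 v2 hpre
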